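-- pv_equiv track=rewrite | github.com/comrender/ComfyUI-Nano-Banana-Resizer | nano_banana_resizer.py | _closest_bucket
-- ===== SOURCE A (Python) =====
-- from typing import Tuple, List
-- import math
--
-- def _closest_bucket(w_in: int, h_in: int, buckets: List[Tuple[int, int]]) -> Tuple[int, int]:
--
--     # 1. Calculate all distances
--     candidates = []
--     for w_bucket, h_bucket in buckets:
--         dist_sq = (w_in - w_bucket) ** 2 + (h_in - h_bucket) ** 2
--         candidates.append((dist_sq, w_bucket, h_bucket))
--
--     candidates.sort(key=lambda x: x[0])
--     best_dist, best_w, best_h = candidates[0]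
--
--     # ──────────────────────────────────────────────────────────────────────
--     # MANUAL OVERRIDE FIX: Ambiguity Zone (for cases like 1704x2461)
--     # ──────────────────────────────────────────────────────────────────────
--     w_target, h_target = (1696, 2528)
--
--     if 1650 < w_in < 1750 and 2350 < h_in < 2550:
--         override_dist_sq = (w_in - w_target) ** 2 + (h_in - h_target) ** 2
--
--         if override_dist_sq < 8000:
--              return (w_target, h_target)
--
--     # ──────────────────────────────────────────────────────────────────────
--     # Fallback to Dynamic Ceiling Logic for True Outliers (Dist_sq > 8000)
--     # ──────────────────────────────────────────────────────────────────────
--     if best_dist > 8000 and len(buckets) > 20: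
--
--         w_new = w_in
--         h_new = h_in
--
--         w_dynamic = math.ceil(w_new / 32) * 32
--         h_dynamic = math.ceil(h_new / 32) * 32
--
--         return (int(w_dynamic), int(h_dynamic))
--
--     # Otherwise, stick with the closest fixed bucket
--     return (best_w, best_h)
-- ===== SOURCE B (Python) =====
-- def _closest_bucket(w_in, h_in, buckets):
--     # Ambiguity-zone override checked up front (it does not depend on the scan).
--     if 1650 < w_in < 1750 and 2350 < h_in < 2550 \
--             and (w_in - 1696) ** 2 + (h_in - 2528) ** 2 < 8000:
--         return (1696, 2528)
--
--     # min() with a key returns the FIRST minimal bucket, exactly the head of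
--     # A's stable sort.
--     best_w, best_h = min(buckets, key=lambda b: (w_in - b[0]) ** 2 + (h_in - b[1]) ** 2)
--
--     if len(buckets) > 20 and (w_in - best_w) ** 2 + (h_in - best_h) ** 2 > 8000:
--         # integer ceiling to a multiple of 32 (exact, no float round trip)
--         return ((w_in + 31) // 32 * 32, (h_in + 31) // 32 * 32)
--
--     return (best_w, best_h)
-- ===== Notes on version B (the rewrite author's own statement) =====
-- stated objective: idiomatic
-- what changed: Replaces the materialise-candidates-then-stable-sort minimum search with a single min(buckets, key=...) call (first minimal bucket = head of the stable sort), checks the ambiguity-zone override up front since it is independent of the scan, and computes the 32-ceiling with integer arithmetic ((n+31)//32*32) instead of float division plus math.ceil.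
import Mathlib
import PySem

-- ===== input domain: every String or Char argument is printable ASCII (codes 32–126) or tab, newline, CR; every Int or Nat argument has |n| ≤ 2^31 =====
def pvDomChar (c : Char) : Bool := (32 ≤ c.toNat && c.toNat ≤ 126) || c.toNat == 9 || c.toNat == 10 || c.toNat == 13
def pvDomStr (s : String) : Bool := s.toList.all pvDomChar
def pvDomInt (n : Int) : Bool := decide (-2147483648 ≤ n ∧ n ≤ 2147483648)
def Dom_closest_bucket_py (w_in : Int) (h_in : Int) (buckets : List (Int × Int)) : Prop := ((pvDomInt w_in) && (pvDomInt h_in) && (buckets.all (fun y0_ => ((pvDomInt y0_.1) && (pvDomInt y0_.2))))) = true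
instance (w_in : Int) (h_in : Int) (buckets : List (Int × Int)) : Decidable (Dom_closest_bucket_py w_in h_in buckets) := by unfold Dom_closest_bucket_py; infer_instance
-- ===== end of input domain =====

-- B replaces A's build-candidates-then-stable-sort minimum search by min-with-key
-- (first minimal bucket), checks the override up front, and computes the 32-ceiling
-- with integer arithmetic; objective: idiomatic.

-- ===== PORT A =====
-- A: build the candidate list, stable-sort by dist_sq, take the head; then overrides.
-- math.ceil(n/32)*32 is ported as the exact integer ceiling -((-n)//32)*32, which is
-- exact on the domain's |n| ≤ 2^31 (float division by 32 is exact there).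
def closest_bucket_py (w_in : Int) (h_in : Int) (buckets : List (Int × Int)) : Int × Int :=
  let candidates : List (Int × Int × Int) :=
    buckets.foldl (fun acc p =>
      acc ++ [((w_in - p.1) * (w_in - p.1) + (h_in - p.2) * (h_in - p.2), p.1, p.2)]) []
  match PySem.List.sorted candidates (fun x => x.1) false with
  | [] => (0, 0)   -- candidates[0] raises IndexError in Python; excluded by Pre_
  | best :: _ =>
    -- the two chained ifs with an early return = one conjunction, else fall through
    if 1650 < w_in ∧ w_in < 1750 ∧ 2350 < h_in ∧ h_in < 2550 ∧
       (w_in - 1696) * (w_in - 1696) + (h_in - 2528) * (h_in - 2528) < 8000 then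
      (1696, 2528)
    else if best.1 > 8000 ∧ buckets.length > 20 then
      (-(PySem.Int.floordiv (-w_in) 32) * 32, -(PySem.Int.floordiv (-h_in) 32) * 32)
    else (best.2.1, best.2.2)

-- ===== PORT B =====
-- B: override first, then min(buckets, key=dist_sq) (first extremal), then fallback.
def closest_bucket_py_alt (w_in : Int) (h_in : Int) (buckets : List (Int × Int)) : Int × Int :=
  if 1650 < w_in ∧ w_in < 1750 ∧ 2350 < h_in ∧ h_in < 2550 ∧
     (w_in - 1696) * (w_in - 1696) + (h_in - 2528) * (h_in - 2528) < 8000 then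
    (1696, 2528)
  else
    match PySem.List.min? buckets
        (fun b => (w_in - b.1) * (w_in - b.1) + (h_in - b.2) * (h_in - b.2)) with
    | none => (0, 0)   -- min([]) raises ValueError in Python; excluded by Pre_
    | some (bw, bh) =>
      if buckets.length > 20 ∧
         (w_in - bw) * (w_in - bw) + (h_in - bh) * (h_in - bh) > 8000 then
        (PySem.Int.floordiv (w_in + 31) 32 * 32, PySem.Int.floordiv (h_in + 31) 32 * 32)
      else (bw, bh)

-- ===== PRECONDITION & SPEC =====
-- Both Pythons raise on an empty bucket list (A: IndexError, B: ValueError); Pre_ excludes exactly that.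
def Pre_closest_bucket_py (w_in : Int) (h_in : Int) (buckets : List (Int × Int)) : Prop := buckets ≠ []
instance (w_in : Int) (h_in : Int) (buckets : List (Int × Int)) : Decidable (Pre_closest_bucket_py w_in h_in buckets) := by unfold Pre_closest_bucket_py; infer_instance
def pvWitness_closest_bucket_py : Int × Int × (List (Int × Int)) := (1704, 2461, [(1024, 1024), (1696, 2528)])
def Spec_closest_bucket_py (w_in : Int) (h_in : Int) (buckets : List (Int × Int)) (out : Int × Int) : Prop := out = closest_bucket_py_alt w_in h_in buckets
instance (w_in : Int) (h_in : Int) (buckets : List (Int × Int)) (out : Int × Int) : Decidable (Spec_closest_bucket_py w_in h_in buckets out) := by unfold Spec_closest_bucket_py; infer_instance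

-- ===== CLAIM (what is proved, stated in full; the proofs are below) =====
def Claim_equal_closest_bucket_py : Prop := ∀ (w_in : Int) (h_in : Int) (buckets : List (Int × Int)), Dom_closest_bucket_py w_in h_in buckets → Pre_closest_bucket_py w_in h_in buckets → Spec_closest_bucket_py w_in h_in buckets (closest_bucket_py w_in h_in buckets)

-- ===== LEMMAS AND PROOFS =====

-- A's append-foldl builds exactly the mapped candidate list.
theorem pv_candidates_eq_map {α β : Type} (f : α → β) (xs : List α) (acc : List β) :
    xs.foldl (fun acc p => acc ++ [f p]) acc = acc ++ xs.map f := by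
  induction xs generalizing acc with
  | nil => simp
  | cons x t ih => simp [List.foldl, ih, List.append_assoc]

-- The head of the insertion-sort accumulator evolves exactly like a running first-min.
theorem pv_head_foldl_insertBy (key : Int × Int × Int → Int)
    (xs : List (Int × Int × Int)) (b : Int × Int × Int) (rest : List (Int × Int × Int)) :
    (xs.foldl (fun acc x => PySem.List.insertBy (fun a c => decide (key a < key c)) x acc) (b :: rest)).head? =
      some (xs.foldl (fun best x => if key x < key best then x else best) b) := by
  induction xs generalizing b rest with
  | nil => simp
  | cons x t ih =>
    simp only [List.foldl]
    by_cases h : key x < key b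
    · simp [PySem.List.insertBy, h, ih]
    · simp [PySem.List.insertBy, h, ih]

-- head of the stable sort of a nonempty list = left fold with strict-< update (first min wins)
theorem pv_head_sorted (c : Int × Int × Int) (cs : List (Int × Int × Int)) :
    (PySem.List.sorted (c :: cs) (fun x => x.1) false).head? =
      some (cs.foldl (fun best x => if x.1 < best.1 then x else best) c) := by
  rw [PySem.List.sorted_eq_foldl_insertBy]
  simp only [List.foldl]
  have h1 : PySem.List.insertBy (fun a b => decide (a.1 < b.1)) c ([] : List (Int × Int × Int)) = [c] := by
    simp [PySem.List.insertBy]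
  rw [h1]
  exact pv_head_foldl_insertBy (fun x => x.1) cs c []

-- min? over a some-accumulator = the running first-min fold.
theorem pv_min_foldl_some {α : Type} (key : α → Int) (xs : List α) (m : α) :
    (xs.foldl (fun acc x =>
        match acc with
        | none => some x
        | some m => if key x < key m then some x else some m) (some m)) =
      some (xs.foldl (fun best x => if key x < key best then x else best) m) := by
  induction xs generalizing m with
  | nil => rfl
  | cons x t ih =>
    simp only [List.foldl]
    by_cases h : key x < key m
    · simp [h, ih]
    · simp [h, ih]

-- min(x::t, key) = running first-min fold started at x.
theorem pv_min_cons {α : Type} (key : α → Int) (x : α) (t : List α) :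
    PySem.List.min? (x :: t) key =
      some (t.foldl (fun best y => if key y < key best then y else best) x) := by
  simp only [PySem.List.min?, List.foldl]
  exact pv_min_foldl_some key t x

-- the running first-min over the mapped triples is the triple of the running first-min
-- over the buckets themselves (the key of a triple is its first component).
theorem pv_fold_triple (dist : Int × Int → Int) (xs : List (Int × Int)) (m : Int × Int) :
    ((xs.map (fun p => ((dist p, p.1, p.2) : Int × Int × Int))).foldl
        (fun best x => if x.1 < best.1 then x else best) (dist m, m.1, m.2)) =
      (fun q => ((dist q, q.1, q.2) : Int × Int × Int))
        (xs.foldl (fun best y => if dist y < dist best then y else best) m) := by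
  induction xs generalizing m with
  | nil => rfl
  | cons x t ih =>
    simp only [List.map, List.foldl]
    by_cases h : dist x < dist m
    · simpa [h] using ih x
    · simpa [h] using ih m

-- exact integer form of math.ceil(n/32)*32 agreement between the two ports
theorem pv_ceil32 (n : Int) : -(PySem.Int.floordiv (-n) 32) = PySem.Int.floordiv (n + 31) 32 := by
  simp only [PySem.Int.floordiv, Int.fdiv_eq_ediv]
  omega

-- ===== VERDICT (by name: the statement is the Claim_ definition above) =====
theorem closest_bucket_py_spec : Claim_equal_closest_bucket_py := by
  intro w_in h_in buckets _ hpre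
  unfold Spec_closest_bucket_py closest_bucket_py closest_bucket_py_alt
  match buckets with
  | [] => exact absurd rfl hpre
  | (w0, h0) :: rest =>
    simp only []
    rw [pv_candidates_eq_map]
    set dist : Int × Int → Int :=
      fun p => (w_in - p.1) * (w_in - p.1) + (h_in - p.2) * (h_in - p.2) with hdist
    have hmap : ([] : List (Int × Int × Int)) ++ ((w0, h0) :: rest).map
        (fun p => (dist p, p.1, p.2)) =
        (dist (w0, h0), w0, h0) :: rest.map (fun p => (dist p, p.1, p.2)) := by
      simp
    rw [hmap]
    have hh := pv_head_sorted (dist (w0, h0), w0, h0)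
      (rest.map (fun p => (dist p, p.1, p.2)))
    rw [pv_fold_triple dist rest (w0, h0)] at hh
    -- name the bucket-level first minimum
    set mB : Int × Int :=
      rest.foldl (fun best y => if dist y < dist best then y else best) (w0, h0) with hmB
    simp only [] at hh
    obtain ⟨m, t, hmt⟩ : ∃ m t, PySem.List.sorted
        ((dist (w0, h0), w0, h0) :: rest.map (fun p => (dist p, p.1, p.2)))
        (fun x => x.1) false = m :: t := by
      rcases hs : PySem.List.sorted _ (fun x : Int × Int × Int => x.1) false with _ | ⟨m, t⟩
      · rw [hs] at hh; simp at hh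
      · exact ⟨m, t, rfl⟩
    rw [hmt] at hh ⊢
    simp only [List.head?] at hh
    injection hh with hm
    rw [hm]
    -- B side: evaluate min?
    rw [pv_min_cons dist (w0, h0) rest, ← hmB]
    clear_value mB
    obtain ⟨bw, bh⟩ := mB
    simp only [hdist, List.length_cons]
    split_ifs with hov h1 h2 h2
    · rfl
    · rw [pv_ceil32, pv_ceil32]
    · exact absurd ⟨h1.2, h1.1⟩ h2
    · exact absurd ⟨h2.2, h2.1⟩ h1
    · rfl
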